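-- pv_equiv track=rewrite | github.com/almarklein/timetagger | timetagger/client/utils.py | convert_text_to_valid_tag
-- ===== SOURCE A (Python) =====
-- def is_valid_tag_charcode(cc):
--     if (
--         not (cc > 47 and cc < 58)
--         and not (cc > 64 and cc < 91)  # numeric (0-9)
--         and not (cc > 96 and cc < 123)  # upper alpha (A-Z)
--         and not (cc == 45 or cc == 47 or cc == 95)  # lower alpha (a-z)
--         and not (cc > 127)  # - / _  # non-ascii
--     ):
--         return False
--     else:
--         return True
--
-- def convert_text_to_valid_tag(s):
--     """Convert any given text into a tag. If the tag name is less than 2 chars,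
--     returns an empty string.
--     """
--     tag_name = "#"
--     last_char = "-"
--     for i in range(len(s)):
--         if is_valid_tag_charcode(ord(s[i])):
--             c = s[i]
--         else:
--             c = "-"
--             if last_char == "-":
--                 continue
--         tag_name += c
--         last_char = c
--
--     if len(tag_name) < 3:
--         tag_name = ""
--     return tag_name
-- ===== SOURCE B (Python) =====
-- # Run-based scan: split s into maximal valid runs and invalid runs (two-pointer),
-- # copy valid runs verbatim, emit one '-' per invalid run unless it is leading or
-- # follows a run ending in '-'; same return values as the per-character version.
--
-- def _valid(c):
--     cc = ord(c)
--     return 47 < cc < 58 or 64 < cc < 91 or 96 < cc < 123 or cc in (45, 47, 95) or cc > 127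
--
-- def convert_text_to_valid_tag(s):
--     n = len(s)
--     i = 0
--     while i < n and not _valid(s[i]):        # drop the leading invalid run
--         i += 1
--     parts = []
--     while i < n:                             # invariant: s[i] is valid
--         j = i
--         while j < n and _valid(s[j]):
--             j += 1
--         seg = s[i:j]                         # maximal valid run
--         k = j
--         while k < n and not _valid(s[k]):
--             k += 1                           # maximal invalid run s[j:k]
--         parts.append(seg)
--         if k > j and not seg.endswith("-"):
--             parts.append("-")
--         i = k
--     tag = "#" + "".join(parts)
--     return tag if len(tag) >= 3 else ""
-- ===== Notes on version B (the rewrite author's own statement) =====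
-- stated objective: alternative
-- what changed: Replaced the per-character state machine (tag accumulator plus last_char flag) with a run-based two-pointer scan that copies each maximal valid run verbatim and emits at most one '-' per maximal invalid run (none when the run is leading or follows a run ending in '-').
import Mathlib
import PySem

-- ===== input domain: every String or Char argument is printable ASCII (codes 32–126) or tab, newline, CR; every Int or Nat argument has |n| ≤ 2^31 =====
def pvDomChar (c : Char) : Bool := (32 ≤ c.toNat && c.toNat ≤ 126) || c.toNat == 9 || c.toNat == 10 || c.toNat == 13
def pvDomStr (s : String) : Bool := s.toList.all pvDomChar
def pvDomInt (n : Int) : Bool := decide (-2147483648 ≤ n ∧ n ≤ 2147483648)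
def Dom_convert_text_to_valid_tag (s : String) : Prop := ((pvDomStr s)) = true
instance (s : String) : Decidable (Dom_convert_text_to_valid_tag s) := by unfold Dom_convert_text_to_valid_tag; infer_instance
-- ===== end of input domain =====

-- B replaces A's per-character stateful loop with a run-based two-pointer scan (same return values; objective: alternative).

-- ===== PORT A =====
def is_valid_tag_charcode (cc : Int) : Bool :=
  if ¬(cc > 47 ∧ cc < 58) ∧ ¬(cc > 64 ∧ cc < 91) ∧ ¬(cc > 96 ∧ cc < 123) ∧
     ¬(cc = 45 ∨ cc = 47 ∨ cc = 95) ∧ ¬(cc > 127) then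
    false
  else
    true

-- one iteration of A's for-loop: state = (tag_name as char list, last_char)
def pyStepA (acc : List Char × Char) (c : Char) : List Char × Char :=
  if is_valid_tag_charcode (c.toNat : Int) then (acc.1 ++ [c], c)
  else if acc.2 = '-' then acc
  else (acc.1 ++ ['-'], '-')

def convert_text_to_valid_tag (s : String) : String :=
  let st := s.toList.foldl pyStepA (['#'], '-')
  if st.1.length < 3 then "" else String.mk st.1

-- ===== PORT B =====
def validB (c : Char) : Bool :=
  let cc : Int := (c.toNat : Int)
  decide ((47 < cc ∧ cc < 58) ∨ (64 < cc ∧ cc < 91) ∨ (96 < cc ∧ cc < 123) ∨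
          cc = 45 ∨ cc = 47 ∨ cc = 95 ∨ 127 < cc)

-- B's outer while-loop: consume a maximal valid run, then a maximal invalid run
def goB : List Char → List Char
  | [] => []
  | c :: t =>
    let seg := (c :: t).takeWhile validB
    let rest := (c :: t).dropWhile validB
    let rest2 := rest.dropWhile (fun x => !validB x)
    seg ++ (if rest ≠ [] ∧ seg.getLast? ≠ some '-' then ['-'] else []) ++ goB rest2
termination_by l => l.length
decreasing_by
  by_cases h : validB c
  · calc (((c :: t).dropWhile validB).dropWhile (fun x => !validB x)).length
        ≤ ((c :: t).dropWhile validB).length := List.length_dropWhile_le _ _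
      _ = (t.dropWhile validB).length := by simp [List.dropWhile_cons, h]
      _ ≤ t.length := List.length_dropWhile_le _ _
      _ < (c :: t).length := by simp
  · calc (((c :: t).dropWhile validB).dropWhile (fun x => !validB x)).length
        = (t.dropWhile (fun x => !validB x)).length := by
          simp [List.dropWhile_cons, h]
      _ ≤ t.length := List.length_dropWhile_le _ _
      _ < (c :: t).length := by simp

def convert_text_to_valid_tag_alt (s : String) : String :=
  let core := goB (s.toList.dropWhile (fun c => !validB c))
  let tag := '#' :: core
  if tag.length < 3 then "" else String.mk tag

-- ===== PRECONDITION & SPEC =====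
def Spec_convert_text_to_valid_tag (s : String) (out : String) : Prop := out = convert_text_to_valid_tag_alt s
instance (s : String) (out : String) : Decidable (Spec_convert_text_to_valid_tag s out) := by unfold Spec_convert_text_to_valid_tag; infer_instance

-- ===== CLAIM (what is proved, stated in full; the proofs are below) =====
def Claim_equal_convert_text_to_valid_tag : Prop := ∀ (s : String), Dom_convert_text_to_valid_tag s → Spec_convert_text_to_valid_tag s (convert_text_to_valid_tag s)

-- ===== LEMMAS AND PROOFS =====

-- A's validity test, applied to a char's code, is B's validity test
lemma valid_eq (c : Char) : is_valid_tag_charcode (c.toNat : Int) = validB c := by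
  simp only [is_valid_tag_charcode, validB]
  split_ifs with h
  · symm
    simp only [decide_eq_false_iff_not]
    omega
  · symm
    simp only [decide_eq_true_eq]
    omega

-- folding A's step over a run of valid chars appends them and tracks the last one
lemma foldl_valid_seg (seg : List Char) (tag : List Char) (last : Char)
    (h : ∀ c ∈ seg, validB c = true) :
    List.foldl pyStepA (tag, last) seg = (tag ++ seg, seg.getLastD last) := by
  induction seg generalizing tag last with
  | nil => simp
  | cons c t ih =>
    have hc : validB c = true := h c (by simp)
    have hstep : pyStepA (tag, last) c = (tag ++ [c], c) := by
      simp [pyStepA, valid_eq, hc]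
    rw [List.foldl_cons, hstep, ih _ c (fun x hx => h x (by simp [hx]))]
    cases t with
    | nil => simp
    | cons b tt =>
      have hd := List.getLast?_eq_getLast (l := b :: tt) (by simp)
      simp [List.getLastD_cons, hd]

-- with last_char = '-', an invalid run is skipped entirely
lemma foldl_invalid_skip (run : List Char) (l' : List Char) (tag : List Char)
    (h : ∀ c ∈ run, validB c = false) :
    List.foldl pyStepA (tag, '-') (run ++ l') = List.foldl pyStepA (tag, '-') l' := by
  induction run with
  | nil => simp
  | cons c t ih =>
    have hc : validB c = false := h c (by simp)
    have hstep : pyStepA (tag, '-') c = (tag, '-') := by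
      simp [pyStepA, valid_eq, hc]
    rw [List.cons_append, List.foldl_cons, hstep]
    exact ih (fun x hx => h x (by simp [hx]))

-- with last_char ≠ '-', a nonempty invalid run contributes exactly one '-'
lemma foldl_invalid_dash (c : Char) (t l' tag : List Char) (last : Char)
    (hlast : last ≠ '-') (h : ∀ x ∈ c :: t, validB x = false) :
    List.foldl pyStepA (tag, last) ((c :: t) ++ l') =
      List.foldl pyStepA (tag ++ ['-'], '-') l' := by
  have hc : validB c = false := h c (by simp)
  have hstep : pyStepA (tag, last) c = (tag ++ ['-'], '-') := by
    simp [pyStepA, valid_eq, hc, hlast]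
  rw [List.cons_append, List.foldl_cons, hstep]
  exact foldl_invalid_skip t l' _ (fun x hx => h x (by simp [hx]))

lemma head_dropWhile_not {p : Char → Bool} (l : List Char) (c : Char)
    (h : (l.dropWhile p).head? = some c) : p c = false := by
  induction l with
  | nil => simp at h
  | cons a t ih =>
    rw [List.dropWhile_cons] at h
    split at h
    · exact ih h
    · simp_all

-- main invariant: A's fold from last_char='-' on a valid-headed list produces B's runs
lemma main_go : ∀ n (l : List Char) (tag : List Char), l.length ≤ n →
    (∀ c, l.head? = some c → validB c = true) →
    (List.foldl pyStepA (tag, '-') l).1 = tag ++ goB l := by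
  intro n
  induction n with
  | zero =>
    intro l tag hn _
    have : l = [] := List.eq_nil_of_length_eq_zero (Nat.le_zero.mp hn)
    subst this; simp [goB]
  | succ n ih =>
    intro l tag hn hhead
    match l with
    | [] => simp [goB]
    | a :: t =>
      have ha : validB a = true := hhead a rfl
      have hgo : goB (a :: t) =
          (a :: t).takeWhile validB ++
          (if (a :: t).dropWhile validB ≠ [] ∧ ((a :: t).takeWhile validB).getLast? ≠ some '-'
           then ['-'] else []) ++
          goB (((a :: t).dropWhile validB).dropWhile (fun x => !validB x)) := by
        rw [goB]
      set seg := (a :: t).takeWhile validB with hseg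
      set rest := (a :: t).dropWhile validB with hrest
      set rest2 := rest.dropWhile (fun x => !validB x) with hrest2
      have hsplit : seg ++ rest = a :: t := List.takeWhile_append_dropWhile
      have hsegvalid : ∀ c ∈ seg, validB c = true := fun c hc => List.mem_takeWhile_imp hc
      have hsegne : seg ≠ [] := by simp [hseg, List.takeWhile_cons, ha]
      have hrest2_head : ∀ c, rest2.head? = some c → validB c = true := by
        intro c hc
        have := head_dropWhile_not (p := fun x => !validB x) rest c hc
        simpa using this
      have hrest_len : rest.length ≤ t.length := by
        rw [hrest, List.dropWhile_cons, if_pos ha]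
        exact List.length_dropWhile_le _ _
      have hrest2_len : rest2.length ≤ n := by
        have h1 : rest2.length ≤ rest.length := List.length_dropWhile_le _ _
        have h2 : t.length ≤ n := by simpa using hn
        omega
      have hfold1 : List.foldl pyStepA (tag, '-') (a :: t)
          = List.foldl pyStepA (tag ++ seg, seg.getLastD '-') rest := by
        conv_lhs => rw [← hsplit]
        rw [List.foldl_append, foldl_valid_seg seg tag '-' hsegvalid]
      rw [hfold1, hgo]
      by_cases hre : rest = []
      · have hr2 : rest2 = [] := by rw [hrest2, hre]; rfl
        rw [hre, hr2]
        simp [goB]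
      · -- rest nonempty: it starts with a maximal invalid run
        obtain ⟨b, rt, hbr⟩ := List.exists_cons_of_ne_nil hre
        have hb : validB b = false := by
          have : rest.head? = some b := by rw [hbr]; rfl
          have h0 := head_dropWhile_not (p := validB) (a :: t) b (by rw [← hrest] at *; rw [this])
          exact h0
        have hruncons : rest.takeWhile (fun x => !validB x) =
            b :: rt.takeWhile (fun x => !validB x) := by
          rw [hbr, List.takeWhile_cons, if_pos (by simp [hb])]
        have hsplit2 : rest.takeWhile (fun x => !validB x) ++ rest2 = rest := by
          rw [hrest2]; exact List.takeWhile_append_dropWhile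
        have hrunvalid : ∀ c ∈ rest.takeWhile (fun x => !validB x), validB c = false := by
          intro c hc
          have := List.mem_takeWhile_imp hc
          simpa using this
        obtain ⟨d, hd⟩ : ∃ d, seg.getLast? = some d := by
          cases hsg : seg.getLast? with
          | none => exact absurd (List.getLast?_eq_none_iff.mp hsg) hsegne
          | some d => exact ⟨d, rfl⟩
        have hlastD : seg.getLastD '-' = d := by
          rw [List.getLastD_eq_getLast?, hd]; rfl
        by_cases hdash : d = '-'
        · -- previous char is '-': the invalid run is dropped, no dash emitted
          have : List.foldl pyStepA (tag ++ seg, seg.getLastD '-') rest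
              = List.foldl pyStepA (tag ++ seg, '-') rest2 := by
            rw [hlastD, hdash]
            conv_lhs => rw [← hsplit2]
            exact foldl_invalid_skip _ _ _ hrunvalid
          rw [this, ih rest2 (tag ++ seg) hrest2_len hrest2_head]
          have hcond : ¬(rest ≠ [] ∧ seg.getLast? ≠ some '-') := by
            rw [hd, hdash]; simp
          rw [if_neg hcond]
          simp
        · -- previous char is not '-': exactly one dash is emitted
          have : List.foldl pyStepA (tag ++ seg, seg.getLastD '-') rest
              = List.foldl pyStepA (tag ++ seg ++ ['-'], '-') rest2 := by
            rw [hlastD]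
            conv_lhs => rw [← hsplit2, hruncons]
            exact foldl_invalid_dash _ _ _ _ _ hdash
              (by rw [← hruncons]; exact hrunvalid)
          rw [this, ih rest2 (tag ++ seg ++ ['-']) hrest2_len hrest2_head]
          have hcond : rest ≠ [] ∧ seg.getLast? ≠ some '-' := by
            refine ⟨hre, ?_⟩
            rw [hd]
            simp [hdash]
          rw [if_pos hcond]
          simp

-- ===== VERDICT (by name: the statement is the Claim_ definition above) =====
theorem convert_text_to_valid_tag_spec : Claim_equal_convert_text_to_valid_tag := by
  intro s _
  unfold Spec_convert_text_to_valid_tag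
  simp only [convert_text_to_valid_tag, convert_text_to_valid_tag_alt]
  have h1 : List.foldl pyStepA (['#'], '-') s.toList
      = List.foldl pyStepA (['#'], '-') (s.toList.dropWhile (fun c => !validB c)) := by
    conv_lhs => rw [← List.takeWhile_append_dropWhile (p := fun c => !validB c) (l := s.toList)]
    exact foldl_invalid_skip _ _ _ (fun c hc => by
      have := List.mem_takeWhile_imp hc; simpa using this)
  have h2 := main_go (s.toList.dropWhile (fun c => !validB c)).length
      (s.toList.dropWhile (fun c => !validB c)) ['#'] le_rfl
      (fun c hc => by simpa using head_dropWhile_not s.toList c hc)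
  rw [h1, h2]
  simp
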